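-- pv_equiv track=rewrite | github.com/pypi-data/pypi-mirror-367 | packages/rithmetic/rithmetic-0.0.18-py3-none-any.whl/rithmetic/Base.py | dectob15
-- ===== SOURCE A (Python) =====
-- def dectob15(num):
--     try:
--         num = int(num)
--     except:
--         return 'Invalid number'
--     if num < 0:
--         return 'Invalid number'
--     else:
--         val = []
--         Q = int(num / 15)
--         M = num % 15
--         val.append(M)
--         while Q > 0:
--             M = Q % 15
--             val.append(M)
--             Q = int(Q / 15)
--         val.reverse()
--         t = 0
--         for i in val:
--             val[t] = str(val[t])
--             if val[t] == '10':
--                 val[t] = 'A'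
--             elif val[t] == '11':
--                 val[t] = 'B'
--             elif val[t] == '12':
--                 val[t] = 'C'
--             elif val[t] == '13':
--                 val[t] = 'D'
--             elif val[t] == '14':
--                 val[t] = 'E'
--             t = t + 1
--         n = 0
--         ans = None
--         for i in val:
--             if ans is None:
--                 ans = val[n]
--             else:
--                 ans = ans + val[n]
--             n = n + 1
--         return ans
-- ===== SOURCE B (Python) =====
-- def dectob15(num):
--     try:
--         num = int(num)
--     except Exception:
--         return 'Invalid number'
--     if num < 0:
--         return 'Invalid number'
--     D = '0123456789ABCDE'
--
--     def conv(n):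
--         q = int(n / 15)
--         m = n % 15
--         return (conv(q) + D[m]) if q > 0 else D[m]
--
--     return conv(num)
-- ===== Notes on version B (the rewrite author's own statement) =====
-- stated objective: simpler
-- what changed: Replaces the three-pass build-list / reverse / per-digit string-compare remap plus manual join with a single recursion over successive quotients that indexes a digit-alphabet string directly.
import Mathlib
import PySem

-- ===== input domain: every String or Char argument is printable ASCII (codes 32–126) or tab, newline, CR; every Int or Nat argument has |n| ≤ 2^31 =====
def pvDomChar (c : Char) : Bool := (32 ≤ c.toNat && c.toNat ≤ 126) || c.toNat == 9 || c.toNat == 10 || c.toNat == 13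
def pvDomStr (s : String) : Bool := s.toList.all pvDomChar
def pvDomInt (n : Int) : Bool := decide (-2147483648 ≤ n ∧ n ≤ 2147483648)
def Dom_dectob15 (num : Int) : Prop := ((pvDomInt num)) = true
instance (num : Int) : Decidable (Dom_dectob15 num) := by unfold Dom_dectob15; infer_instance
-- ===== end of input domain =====

-- B replaces A's build-list / reverse / remap / manual-join passes by one recursion over
-- successive quotients indexing a digit-alphabet string; objective: simpler.

-- ===== PORT A =====
-- A's remap loop body: str(d), then the '10'..'14' → 'A'..'E' branch chain
def dectob15Digit (d : Int) : String :=
  let s := PySem.Int.toStr d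
  if s = "10" then "A"
  else if s = "11" then "B"
  else if s = "12" then "C"
  else if s = "13" then "D"
  else if s = "14" then "E"
  else s

-- A's while loop: M = Q % 15; val.append(M); Q = int(Q / 15).
-- int(Q / 15) is ported as floordiv: exact on the 0 ≤ Q ≤ 2^31 values the loop sees
-- (truncating and flooring division agree on nonnegatives, and no float rounding can
-- cross an integer boundary for |Q| ≤ 2^31).
def dectob15Loop (Q : Int) (val : List Int) : List Int :=
  if h : Q > 0 then
    dectob15Loop (PySem.Int.floordiv Q 15) (val ++ [PySem.Int.mod Q 15])
  else val
termination_by Q.toNat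
decreasing_by
  rw [PySem.Int.floordiv_eq_ediv_of_pos (by omega)]
  have h2 : 0 ≤ Q / 15 := Int.ediv_nonneg (by omega) (by omega)
  have h3 : Q / 15 * 15 ≤ Q := Int.ediv_mul_le Q (by omega)
  omega

-- A's final loop: ans starts as None, the first digit replaces it, the rest are concatenated.
-- The [] branch is Python's 'return None'; it is unreachable (val always holds ≥ 1 digit).
def dectob15JoinAux (strs : List String) : String :=
  match strs with
  | [] => ""
  | h :: t => t.foldl (· ++ ·) h

def dectob15 (num : Int) : String :=
  if num < 0 then "Invalid number"
  else
    let val : List Int := dectob15Loop (PySem.Int.floordiv num 15) [PySem.Int.mod num 15]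
    dectob15JoinAux (val.reverse.map dectob15Digit)

-- ===== PORT B =====
-- D[m]: Python's 1-char-string indexing of D = '0123456789ABCDE' (in range for 0 ≤ m < 15,
-- which always holds here, so the getD default never fires)
def pvD (m : Int) : String :=
  ((PySem.Str.pyGet? "0123456789ABCDE" m).map (fun c => String.ofList [c])).getD ""

-- Source B's conv: q = int(n / 15) (exact as floordiv on the nonnegative inputs it sees), m = n % 15.
def dectob15Conv (n : Int) : String :=
  if h : PySem.Int.floordiv n 15 > 0 then
    dectob15Conv (PySem.Int.floordiv n 15) ++ pvD (PySem.Int.mod n 15)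
  else pvD (PySem.Int.mod n 15)
termination_by n.toNat
decreasing_by
  rw [PySem.Int.floordiv_eq_ediv_of_pos (by omega)] at h ⊢
  have h3 : n / 15 * 15 ≤ n := Int.ediv_mul_le n (by omega)
  omega

def dectob15_alt (num : Int) : String :=
  if num < 0 then "Invalid number"
  else dectob15Conv num

-- ===== PRECONDITION & SPEC =====
def Spec_dectob15 (num : Int) (out : String) : Prop := out = dectob15_alt num
instance (num : Int) (out : String) : Decidable (Spec_dectob15 num out) := by unfold Spec_dectob15; infer_instance

-- ===== CLAIM (what is proved, stated in full; the proofs are below) =====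
def Claim_equal_dectob15 : Prop := ∀ (num : Int), Dom_dectob15 num → Spec_dectob15 num (dectob15 num)

-- ===== LEMMAS AND PROOFS =====

-- the digit list A's loop appends, acc-free (most significant digit LAST)
def pvDigitsRev (Q : Int) : List Int :=
  if h : Q > 0 then PySem.Int.mod Q 15 :: pvDigitsRev (PySem.Int.floordiv Q 15) else []
termination_by Q.toNat
decreasing_by
  rw [PySem.Int.floordiv_eq_ediv_of_pos (by omega)]
  have h2 : 0 ≤ Q / 15 := Int.ediv_nonneg (by omega) (by omega)
  have h3 : Q / 15 * 15 ≤ Q := Int.ediv_mul_le Q (by omega)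
  omega

theorem pvLoop_eq (Q : Int) (acc : List Int) :
    dectob15Loop Q acc = acc ++ pvDigitsRev Q := by
  fun_induction dectob15Loop Q acc with
  | case1 Q acc h ih =>
    rw [ih]
    conv_rhs => rw [pvDigitsRev]
    rw [dif_pos h]
    simp
  | case2 Q acc h =>
    rw [pvDigitsRev, dif_neg h, List.append_nil]

theorem pvJoinAux_append (ys : List String) (s : String) :
    dectob15JoinAux (ys ++ [s]) = if ys = [] then s else dectob15JoinAux ys ++ s := by
  cases ys with
  | nil => simp [dectob15JoinAux]
  | cons h t => simp [dectob15JoinAux, List.foldl_append]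

theorem pvDigit_eq (m : Int) (h0 : 0 ≤ m) (h1 : m < 15) :
    dectob15Digit m = pvD m := by
  interval_cases m <;> decide

theorem pvMain (Q : Int) :
    dectob15JoinAux ((pvDigitsRev Q).reverse.map dectob15Digit)
      = if 0 < Q then dectob15Conv Q else "" := by
  fun_induction pvDigitsRev Q with
  | case1 Q h ih =>
    have hm0 : 0 ≤ PySem.Int.mod Q 15 := PySem.Int.mod_nonneg _ (by omega)
    have hm1 : PySem.Int.mod Q 15 < 15 := PySem.Int.mod_lt _ (by omega)
    rw [if_pos h, dectob15Conv]
    simp only [List.reverse_cons, List.map_append, List.map_cons, List.map_nil]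
    rw [pvJoinAux_append, ih, pvDigit_eq _ hm0 hm1]
    by_cases hq : 0 < PySem.Int.floordiv Q 15
    · have hne : (pvDigitsRev (PySem.Int.floordiv Q 15)).reverse.map dectob15Digit ≠ [] := by
        rw [pvDigitsRev, dif_pos hq]; simp
      rw [if_neg hne, if_pos hq, dif_pos hq]
    · have hnil : (pvDigitsRev (PySem.Int.floordiv Q 15)).reverse.map dectob15Digit = [] := by
        rw [pvDigitsRev, dif_neg hq]; simp
      rw [if_pos hnil, dif_neg hq]
  | case2 Q h =>
    rw [if_neg h]
    rfl

-- ===== VERDICT (by name: the statement is the Claim_ definition above) =====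
theorem dectob15_spec : Claim_equal_dectob15 := by
  intro num _
  unfold Spec_dectob15 dectob15 dectob15_alt
  by_cases hneg : num < 0
  · rw [if_pos hneg, if_pos hneg]
  · rw [if_neg hneg, if_neg hneg]
    have hm0 : 0 ≤ PySem.Int.mod num 15 := PySem.Int.mod_nonneg _ (by omega)
    have hm1 : PySem.Int.mod num 15 < 15 := PySem.Int.mod_lt _ (by omega)
    simp only [pvLoop_eq, List.singleton_append, List.reverse_cons, List.map_append,
      List.map_cons, List.map_nil]
    rw [pvJoinAux_append, pvMain, pvDigit_eq _ hm0 hm1]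
    by_cases hq : 0 < PySem.Int.floordiv num 15
    · have hne : (pvDigitsRev (PySem.Int.floordiv num 15)).reverse.map dectob15Digit ≠ [] := by
        rw [pvDigitsRev, dif_pos hq]; simp
      rw [if_neg hne, if_pos hq]
      conv_rhs => rw [dectob15Conv]
      rw [dif_pos hq]
    · have hnil : (pvDigitsRev (PySem.Int.floordiv num 15)).reverse.map dectob15Digit = [] := by
        rw [pvDigitsRev, dif_neg hq]; simp
      rw [if_pos hnil]
      conv_rhs => rw [dectob15Conv]
      rw [dif_neg hq]
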